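-- pv_equiv track=rewrite | github.com/Ram1288/hackathon | agents/investigation_agent.py | _parse_describe_output
-- ===== SOURCE A (Python) =====
-- def _parse_describe_output(output: str) -> str:
--     """
--     Parse kubectl describe pod/deployment output.
--     Extracts: Status, Conditions, Events (MOST IMPORTANT)
--     """
--     lines = output.split('\n')
--     critical_sections = []
--
--     # Extract basic info (first few lines)
--     critical_sections.append("=== BASIC INFO ===")
--     critical_sections.extend(lines[:5])  # Name, Namespace, Priority, etc.
--
--     # Extract Status section
--     in_status = False
--     status_lines = []
--     for i, line in enumerate(lines):
--         if line.startswith('Status:'):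
--             in_status = True
--             status_lines.append(line)
--         elif in_status and line.startswith(' '):
--             status_lines.append(line)
--         elif in_status and not line.startswith(' '):
--             break
--
--     if status_lines:
--         critical_sections.append("\n=== STATUS ===")
--         critical_sections.extend(status_lines)
--
--     # Extract Conditions section
--     in_conditions = False
--     conditions_lines = []
--     for i, line in enumerate(lines):
--         if line.startswith('Conditions:'):
--             in_conditions = True
--             conditions_lines.append(line)
--             # Get next 10 lines or until next section
--             for j in range(i+1, min(i+15, len(lines))):
--                 if lines[j] and not lines[j][0].isspace() and ':' in lines[j]:
--                     break
--                 conditions_lines.append(lines[j])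
--             break
--
--     if conditions_lines:
--         critical_sections.append("\n=== CONDITIONS ===")
--         critical_sections.extend(conditions_lines)
--
--     # Extract State and Reason (for containers)
--     state_lines = []
--     for i, line in enumerate(lines):
--         if 'State:' in line or 'Reason:' in line or 'Message:' in line:
--             state_lines.append(line)
--
--     if state_lines:
--         critical_sections.append("\n=== CONTAINER STATE ===")
--         critical_sections.extend(state_lines)
--
--     # Extract Events section (MOST CRITICAL - contains actual errors)
--     in_events = False
--     events_lines = []
--     for i, line in enumerate(lines):
--         if line.startswith('Events:'):
--             in_events = True
--             events_lines.append(line)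
--             # Get all remaining lines (events are at the end)
--             events_lines.extend(lines[i+1:])
--             break
--
--     if events_lines:
--         critical_sections.append("\n=== EVENTS (CRITICAL) ===")
--         critical_sections.extend(events_lines)
--
--     return '\n'.join(critical_sections)
-- ===== SOURCE B (Python) =====
-- def _parse_describe_output(output: str) -> str:
--     """Single-pass re-implementation: one loop over the lines maintains the
--     state of all four section scanners simultaneously."""
--     lines = output.split('\n')
--     status_lines = []
--     in_status = False
--     status_done = False
--     cond_lines = []
--     cond_seen = False
--     cond_active = False
--     cond_left = 0
--     state_lines = []
--     events_lines = []
--     in_events = False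
--     for line in lines:
--         # Status scanner (break in A == status_done here)
--         if not status_done:
--             if line.startswith('Status:'):
--                 in_status = True
--                 status_lines.append(line)
--             elif in_status:
--                 if line.startswith(' '):
--                     status_lines.append(line)
--                 else:
--                     status_done = True
--         # Conditions scanner (14-line window after the header, early stop)
--         if cond_active:
--             if cond_left == 0 or (line and not line[0].isspace() and ':' in line):
--                 cond_active = False
--             else:
--                 cond_lines.append(line)
--                 cond_left -= 1
--         elif not cond_seen and line.startswith('Conditions:'):
--             cond_seen = True
--             cond_active = True
--             cond_left = 14
--             cond_lines.append(line)
--         # Container-state scanner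
--         if 'State:' in line or 'Reason:' in line or 'Message:' in line:
--             state_lines.append(line)
--         # Events scanner
--         if in_events:
--             events_lines.append(line)
--         elif line.startswith('Events:'):
--             in_events = True
--             events_lines.append(line)
--     parts = ["=== BASIC INFO ==="] + lines[:5]
--     if status_lines:
--         parts.append("\n=== STATUS ===")
--         parts.extend(status_lines)
--     if cond_lines:
--         parts.append("\n=== CONDITIONS ===")
--         parts.extend(cond_lines)
--     if state_lines:
--         parts.append("\n=== CONTAINER STATE ===")
--         parts.extend(state_lines)
--     if events_lines:
--         parts.append("\n=== EVENTS (CRITICAL) ===")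
--         parts.extend(events_lines)
--     return '\n'.join(parts)
-- ===== Notes on version B (the rewrite author's own statement) =====
-- stated objective: alternative
-- what changed: A scans the line list four separate times (Status, Conditions, Container State, Events); B makes a single pass over the lines maintaining the state of all four scanners at once, then assembles the sections.
import Mathlib
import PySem

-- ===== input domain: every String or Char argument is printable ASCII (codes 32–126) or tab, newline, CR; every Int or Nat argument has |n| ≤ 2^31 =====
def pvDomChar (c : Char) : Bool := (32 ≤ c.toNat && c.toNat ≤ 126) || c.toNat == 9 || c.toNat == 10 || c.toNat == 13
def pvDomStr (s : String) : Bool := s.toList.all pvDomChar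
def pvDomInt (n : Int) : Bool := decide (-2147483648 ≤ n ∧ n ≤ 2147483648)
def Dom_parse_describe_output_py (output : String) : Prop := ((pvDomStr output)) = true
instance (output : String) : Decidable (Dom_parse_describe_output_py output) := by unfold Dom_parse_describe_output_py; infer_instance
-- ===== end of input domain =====

-- B is a single pass over the lines maintaining all four scanners' state at once,
-- instead of A's four separate scans of the line list (objective: alternative decomposition).

-- shared line predicates (the same Python sub-expressions appear in both programs)
-- 'lines[j] and not lines[j][0].isspace() and ":" in lines[j]'
def pvBreakCond (l : String) : Bool :=
  match PySem.Str.pyGet? l 0 with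
  | some c => (!PySem.Chars.isspace c) && PySem.Str.isIn ":" l
  | none => false

-- '"State:" in line or "Reason:" in line or "Message:" in line'
def pvHit (l : String) : Bool :=
  PySem.Str.isIn "State:" l || PySem.Str.isIn "Reason:" l || PySem.Str.isIn "Message:" l

-- ===== PORT A =====

-- the Status scan (enumerate loop with break → structural recursion over the lines)
def pvA_status : List String → Bool → List String → List String
  | [], _, acc => acc
  | l :: rest, inSt, acc =>
    if PySem.Str.startswith l "Status:" then pvA_status rest true (acc ++ [l])
    else if inSt && PySem.Str.startswith l " " then pvA_status rest inSt (acc ++ [l])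
    else if inSt then acc
    else pvA_status rest inSt acc

-- inner 'for j in range(i+1, min(i+15, len(lines)))' window (14 lines after the header)
def pvA_condInner : Nat → List String → List String
  | 0, _ => []
  | _, [] => []
  | n + 1, l :: rest => if pvBreakCond l then [] else l :: pvA_condInner n rest

-- the Conditions scan (first header line, then the bounded window, then break)
def pvA_cond : List String → List String
  | [] => []
  | l :: rest =>
    if PySem.Str.startswith l "Conditions:" then l :: pvA_condInner 14 rest
    else pvA_cond rest

-- the Events scan (first 'Events:' line plus everything after it)
def pvA_events : List String → List String
  | [] => []
  | l :: rest => if PySem.Str.startswith l "Events:" then l :: rest else pvA_events rest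

def parse_describe_output_py (output : String) : String :=
  let lines := (PySem.Str.split? output "\n").getD []
  let cs0 := ["=== BASIC INFO ==="] ++ PySem.List.slice lines none (some 5)
  let statusLines := pvA_status lines false []
  let cs1 := cs0 ++ (if statusLines = [] then [] else ["\n=== STATUS ==="] ++ statusLines)
  let condLines := pvA_cond lines
  let cs2 := cs1 ++ (if condLines = [] then [] else ["\n=== CONDITIONS ==="] ++ condLines)
  let stateLines := lines.foldl (fun acc l => if pvHit l then acc ++ [l] else acc) []
  let cs3 := cs2 ++ (if stateLines = [] then [] else ["\n=== CONTAINER STATE ==="] ++ stateLines)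
  let eventsLines := pvA_events lines
  let cs4 := cs3 ++ (if eventsLines = [] then [] else ["\n=== EVENTS (CRITICAL) ==="] ++ eventsLines)
  PySem.Str.join "\n" cs4

-- ===== PORT B =====

structure PvBState where
  inStatus : Bool
  statusDone : Bool
  status : List String
  condSeen : Bool
  condActive : Bool
  condLeft : Nat
  condL : List String
  stateL : List String
  inEvents : Bool
  events : List String
deriving Repr

-- Status scanner (the break of A's loop is the statusDone flag)
def pvB_stepStatusPart (s : PvBState) (l : String) : PvBState :=
  if s.statusDone then s
  else if PySem.Str.startswith l "Status:" then { s with inStatus := true, status := s.status ++ [l] }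
  else if s.inStatus then
    (if PySem.Str.startswith l " " then { s with status := s.status ++ [l] }
     else { s with statusDone := true })
  else s

-- Conditions scanner (14-line window after the header, early stop)
def pvB_stepCondPart (s : PvBState) (l : String) : PvBState :=
  if s.condActive then
    (if s.condLeft == 0 || pvBreakCond l then { s with condActive := false }
     else { s with condL := s.condL ++ [l], condLeft := s.condLeft - 1 })
  else if !s.condSeen && PySem.Str.startswith l "Conditions:" then
    { s with condSeen := true, condActive := true, condLeft := 14, condL := s.condL ++ [l] }
  else s

-- container-state scanner
def pvB_stepStatePart (s : PvBState) (l : String) : PvBState :=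
  if pvHit l then { s with stateL := s.stateL ++ [l] } else s

-- Events scanner
def pvB_stepEventsPart (s : PvBState) (l : String) : PvBState :=
  if s.inEvents then { s with events := s.events ++ [l] }
  else if PySem.Str.startswith l "Events:" then { s with inEvents := true, events := s.events ++ [l] }
  else s

-- the whole loop body: the four scanners applied in order to the running state
def pvB_step (s : PvBState) (l : String) : PvBState :=
  pvB_stepEventsPart (pvB_stepStatePart (pvB_stepCondPart (pvB_stepStatusPart s l) l) l) l

def pvB_init : PvBState :=
  { inStatus := false, statusDone := false, status := []
    condSeen := false, condActive := false, condLeft := 0, condL := []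
    stateL := [], inEvents := false, events := [] }

def parse_describe_output_py_alt (output : String) : String :=
  let lines := (PySem.Str.split? output "\n").getD []
  let st := lines.foldl pvB_step pvB_init
  let parts := ["=== BASIC INFO ==="] ++ PySem.List.slice lines none (some 5)
  let parts := parts ++ (if st.status = [] then [] else ["\n=== STATUS ==="] ++ st.status)
  let parts := parts ++ (if st.condL = [] then [] else ["\n=== CONDITIONS ==="] ++ st.condL)
  let parts := parts ++ (if st.stateL = [] then [] else ["\n=== CONTAINER STATE ==="] ++ st.stateL)
  let parts := parts ++ (if st.events = [] then [] else ["\n=== EVENTS (CRITICAL) ==="] ++ st.events)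
  PySem.Str.join "\n" parts

-- ===== PRECONDITION & SPEC =====
def Spec_parse_describe_output_py (output : String) (out : String) : Prop := out = parse_describe_output_py_alt output
instance (output : String) (out : String) : Decidable (Spec_parse_describe_output_py output out) := by unfold Spec_parse_describe_output_py; infer_instance

-- ===== CLAIM (what is proved, stated in full; the proofs are below) =====
def Claim_equal_parse_describe_output_py : Prop := ∀ (output : String), Dom_parse_describe_output_py output → Spec_parse_describe_output_py output (parse_describe_output_py output)

-- ===== LEMMAS AND PROOFS =====

-- group step functions: pvB_step's action on each independent component group
def pvStepStatus : Bool × Bool × List String → String → Bool × Bool × List String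
  | (inSt, done, acc), l =>
    if done then (inSt, done, acc)
    else if PySem.Str.startswith l "Status:" then (true, done, acc ++ [l])
    else if inSt then
      (if PySem.Str.startswith l " " then (inSt, done, acc ++ [l]) else (inSt, true, acc))
    else (inSt, done, acc)

def pvStepCond : Bool × Bool × Nat × List String → String → Bool × Bool × Nat × List String
  | (seen, active, left, acc), l =>
    if active then
      (if left == 0 || pvBreakCond l then (seen, false, left, acc)
       else (seen, active, left - 1, acc ++ [l]))
    else if !seen && PySem.Str.startswith l "Conditions:" then (true, true, 14, acc ++ [l])
    else (seen, active, left, acc)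

def pvStepEvents : Bool × List String → String → Bool × List String
  | (inEv, acc), l =>
    if inEv then (inEv, acc ++ [l])
    else if PySem.Str.startswith l "Events:" then (true, acc ++ [l])
    else (inEv, acc)

theorem pvP_Status_condSeen (s : PvBState) (l : String) :
    (pvB_stepStatusPart s l).condSeen = s.condSeen := by
  simp only [pvB_stepStatusPart]; split_ifs <;> rfl

theorem pvP_Status_condActive (s : PvBState) (l : String) :
    (pvB_stepStatusPart s l).condActive = s.condActive := by
  simp only [pvB_stepStatusPart]; split_ifs <;> rfl

theorem pvP_Status_condLeft (s : PvBState) (l : String) :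
    (pvB_stepStatusPart s l).condLeft = s.condLeft := by
  simp only [pvB_stepStatusPart]; split_ifs <;> rfl

theorem pvP_Status_condL (s : PvBState) (l : String) :
    (pvB_stepStatusPart s l).condL = s.condL := by
  simp only [pvB_stepStatusPart]; split_ifs <;> rfl

theorem pvP_Status_stateL (s : PvBState) (l : String) :
    (pvB_stepStatusPart s l).stateL = s.stateL := by
  simp only [pvB_stepStatusPart]; split_ifs <;> rfl

theorem pvP_Status_inEvents (s : PvBState) (l : String) :
    (pvB_stepStatusPart s l).inEvents = s.inEvents := by
  simp only [pvB_stepStatusPart]; split_ifs <;> rfl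

theorem pvP_Status_events (s : PvBState) (l : String) :
    (pvB_stepStatusPart s l).events = s.events := by
  simp only [pvB_stepStatusPart]; split_ifs <;> rfl

theorem pvP_Cond_inStatus (s : PvBState) (l : String) :
    (pvB_stepCondPart s l).inStatus = s.inStatus := by
  simp only [pvB_stepCondPart]; split_ifs <;> rfl

theorem pvP_Cond_statusDone (s : PvBState) (l : String) :
    (pvB_stepCondPart s l).statusDone = s.statusDone := by
  simp only [pvB_stepCondPart]; split_ifs <;> rfl

theorem pvP_Cond_status (s : PvBState) (l : String) :
    (pvB_stepCondPart s l).status = s.status := by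
  simp only [pvB_stepCondPart]; split_ifs <;> rfl

theorem pvP_Cond_stateL (s : PvBState) (l : String) :
    (pvB_stepCondPart s l).stateL = s.stateL := by
  simp only [pvB_stepCondPart]; split_ifs <;> rfl

theorem pvP_Cond_inEvents (s : PvBState) (l : String) :
    (pvB_stepCondPart s l).inEvents = s.inEvents := by
  simp only [pvB_stepCondPart]; split_ifs <;> rfl

theorem pvP_Cond_events (s : PvBState) (l : String) :
    (pvB_stepCondPart s l).events = s.events := by
  simp only [pvB_stepCondPart]; split_ifs <;> rfl

theorem pvP_State_inStatus (s : PvBState) (l : String) :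
    (pvB_stepStatePart s l).inStatus = s.inStatus := by
  simp only [pvB_stepStatePart]; split_ifs <;> rfl

theorem pvP_State_statusDone (s : PvBState) (l : String) :
    (pvB_stepStatePart s l).statusDone = s.statusDone := by
  simp only [pvB_stepStatePart]; split_ifs <;> rfl

theorem pvP_State_status (s : PvBState) (l : String) :
    (pvB_stepStatePart s l).status = s.status := by
  simp only [pvB_stepStatePart]; split_ifs <;> rfl

theorem pvP_State_condSeen (s : PvBState) (l : String) :
    (pvB_stepStatePart s l).condSeen = s.condSeen := by
  simp only [pvB_stepStatePart]; split_ifs <;> rfl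

theorem pvP_State_condActive (s : PvBState) (l : String) :
    (pvB_stepStatePart s l).condActive = s.condActive := by
  simp only [pvB_stepStatePart]; split_ifs <;> rfl

theorem pvP_State_condLeft (s : PvBState) (l : String) :
    (pvB_stepStatePart s l).condLeft = s.condLeft := by
  simp only [pvB_stepStatePart]; split_ifs <;> rfl

theorem pvP_State_condL (s : PvBState) (l : String) :
    (pvB_stepStatePart s l).condL = s.condL := by
  simp only [pvB_stepStatePart]; split_ifs <;> rfl

theorem pvP_State_inEvents (s : PvBState) (l : String) :
    (pvB_stepStatePart s l).inEvents = s.inEvents := by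
  simp only [pvB_stepStatePart]; split_ifs <;> rfl

theorem pvP_State_events (s : PvBState) (l : String) :
    (pvB_stepStatePart s l).events = s.events := by
  simp only [pvB_stepStatePart]; split_ifs <;> rfl

theorem pvP_Events_inStatus (s : PvBState) (l : String) :
    (pvB_stepEventsPart s l).inStatus = s.inStatus := by
  simp only [pvB_stepEventsPart]; split_ifs <;> rfl

theorem pvP_Events_statusDone (s : PvBState) (l : String) :
    (pvB_stepEventsPart s l).statusDone = s.statusDone := by
  simp only [pvB_stepEventsPart]; split_ifs <;> rfl

theorem pvP_Events_status (s : PvBState) (l : String) :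
    (pvB_stepEventsPart s l).status = s.status := by
  simp only [pvB_stepEventsPart]; split_ifs <;> rfl

theorem pvP_Events_condSeen (s : PvBState) (l : String) :
    (pvB_stepEventsPart s l).condSeen = s.condSeen := by
  simp only [pvB_stepEventsPart]; split_ifs <;> rfl

theorem pvP_Events_condActive (s : PvBState) (l : String) :
    (pvB_stepEventsPart s l).condActive = s.condActive := by
  simp only [pvB_stepEventsPart]; split_ifs <;> rfl

theorem pvP_Events_condLeft (s : PvBState) (l : String) :
    (pvB_stepEventsPart s l).condLeft = s.condLeft := by
  simp only [pvB_stepEventsPart]; split_ifs <;> rfl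

theorem pvP_Events_condL (s : PvBState) (l : String) :
    (pvB_stepEventsPart s l).condL = s.condL := by
  simp only [pvB_stepEventsPart]; split_ifs <;> rfl

theorem pvP_Events_stateL (s : PvBState) (l : String) :
    (pvB_stepEventsPart s l).stateL = s.stateL := by
  simp only [pvB_stepEventsPart]; split_ifs <;> rfl

theorem pv_act_status (s : PvBState) (l : String) :
    ((pvB_stepStatusPart s l).inStatus, (pvB_stepStatusPart s l).statusDone, (pvB_stepStatusPart s l).status)
      = pvStepStatus (s.inStatus, s.statusDone, s.status) l := by
  simp only [pvB_stepStatusPart, pvStepStatus]; split_ifs <;> rfl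

theorem pv_act_cond (s : PvBState) (l : String) :
    ((pvB_stepCondPart s l).condSeen, (pvB_stepCondPart s l).condActive, (pvB_stepCondPart s l).condLeft, (pvB_stepCondPart s l).condL)
      = pvStepCond (s.condSeen, s.condActive, s.condLeft, s.condL) l := by
  simp only [pvB_stepCondPart, pvStepCond]; split_ifs <;> rfl

theorem pv_act_state (s : PvBState) (l : String) :
    (pvB_stepStatePart s l).stateL = (if pvHit l then s.stateL ++ [l] else s.stateL) := by
  simp only [pvB_stepStatePart]; split_ifs <;> rfl

theorem pv_act_events (s : PvBState) (l : String) :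
    ((pvB_stepEventsPart s l).inEvents, (pvB_stepEventsPart s l).events)
      = pvStepEvents (s.inEvents, s.events) l := by
  simp only [pvB_stepEventsPart, pvStepEvents]; split_ifs <;> rfl

theorem pv_step_status (s : PvBState) (l : String) :
    ((pvB_step s l).inStatus, (pvB_step s l).statusDone, (pvB_step s l).status)
      = pvStepStatus (s.inStatus, s.statusDone, s.status) l := by
  simp only [pvB_step, pvP_Events_inStatus, pvP_Events_statusDone, pvP_Events_status,
    pvP_State_inStatus, pvP_State_statusDone, pvP_State_status,
    pvP_Cond_inStatus, pvP_Cond_statusDone, pvP_Cond_status]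
  exact pv_act_status s l

theorem pv_step_cond (s : PvBState) (l : String) :
    ((pvB_step s l).condSeen, (pvB_step s l).condActive, (pvB_step s l).condLeft, (pvB_step s l).condL)
      = pvStepCond (s.condSeen, s.condActive, s.condLeft, s.condL) l := by
  simp only [pvB_step, pvP_Events_condSeen, pvP_Events_condActive, pvP_Events_condLeft, pvP_Events_condL,
    pvP_State_condSeen, pvP_State_condActive, pvP_State_condLeft, pvP_State_condL]
  rw [pv_act_cond]
  simp only [pvP_Status_condSeen, pvP_Status_condActive, pvP_Status_condLeft, pvP_Status_condL]

theorem pv_step_state (s : PvBState) (l : String) :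
    (pvB_step s l).stateL = (if pvHit l then s.stateL ++ [l] else s.stateL) := by
  simp only [pvB_step, pvP_Events_stateL, pv_act_state, pvP_Cond_stateL, pvP_Status_stateL]

theorem pv_step_events (s : PvBState) (l : String) :
    ((pvB_step s l).inEvents, (pvB_step s l).events)
      = pvStepEvents (s.inEvents, s.events) l := by
  simp only [pvB_step]
  rw [pv_act_events]
  simp only [pvP_State_inEvents, pvP_State_events, pvP_Cond_inEvents, pvP_Cond_events,
    pvP_Status_inEvents, pvP_Status_events]

-- projections of the one-pass fold are folds of the group steps
theorem pv_proj_status (lines : List String) (s : PvBState) :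
    ((lines.foldl pvB_step s).inStatus, (lines.foldl pvB_step s).statusDone, (lines.foldl pvB_step s).status)
      = lines.foldl pvStepStatus (s.inStatus, s.statusDone, s.status) := by
  induction lines generalizing s with
  | nil => rfl
  | cons l rest ih => rw [List.foldl_cons, List.foldl_cons, ih, pv_step_status]

theorem pv_proj_cond (lines : List String) (s : PvBState) :
    ((lines.foldl pvB_step s).condSeen, (lines.foldl pvB_step s).condActive, (lines.foldl pvB_step s).condLeft, (lines.foldl pvB_step s).condL)
      = lines.foldl pvStepCond (s.condSeen, s.condActive, s.condLeft, s.condL) := by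
  induction lines generalizing s with
  | nil => rfl
  | cons l rest ih => rw [List.foldl_cons, List.foldl_cons, ih, pv_step_cond]

theorem pv_proj_state (lines : List String) (s : PvBState) :
    (lines.foldl pvB_step s).stateL
      = lines.foldl (fun acc l => if pvHit l then acc ++ [l] else acc) s.stateL := by
  induction lines generalizing s with
  | nil => rfl
  | cons l rest ih => rw [List.foldl_cons, List.foldl_cons, ih, pv_step_state]

theorem pv_proj_events (lines : List String) (s : PvBState) :
    ((lines.foldl pvB_step s).inEvents, (lines.foldl pvB_step s).events)
      = lines.foldl pvStepEvents (s.inEvents, s.events) := by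
  induction lines generalizing s with
  | nil => rfl
  | cons l rest ih => rw [List.foldl_cons, List.foldl_cons, ih, pv_step_events]

-- the group folds compute A's scans
theorem pv_status_done (lines : List String) (b : Bool) (acc : List String) :
    lines.foldl pvStepStatus (b, true, acc) = (b, true, acc) := by
  induction lines with
  | nil => rfl
  | cons l rest ih => rw [List.foldl_cons]; simpa [pvStepStatus] using ih

theorem pv_status_run (lines : List String) (inSt : Bool) (acc : List String) :
    (lines.foldl pvStepStatus (inSt, false, acc)).2.2 = pvA_status lines inSt acc := by
  induction lines generalizing inSt acc with
  | nil => rfl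
  | cons l rest ih =>
    rw [List.foldl_cons]
    cases inSt <;>
      (simp only [pvStepStatus, pvA_status, Bool.false_and, Bool.true_and, Bool.false_eq_true,
         if_false, ite_true]
       split_ifs <;> first | apply ih | (rw [pv_status_done]))

theorem pv_cond_frozen (lines : List String) (n : Nat) (acc : List String) :
    lines.foldl pvStepCond (true, false, n, acc) = (true, false, n, acc) := by
  induction lines with
  | nil => rfl
  | cons l rest ih => rw [List.foldl_cons]; simpa [pvStepCond] using ih

theorem pv_cond_active (lines : List String) (n : Nat) (acc : List String) :
    (lines.foldl pvStepCond (true, true, n, acc)).2.2.2 = acc ++ pvA_condInner n lines := by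
  induction lines generalizing n acc with
  | nil => cases n <;> simp [pvA_condInner]
  | cons l rest ih =>
    rw [List.foldl_cons]
    match n with
    | 0 => simp [pvStepCond, pvA_condInner, pv_cond_frozen]
    | n + 1 =>
      by_cases hb : pvBreakCond l = true
      · simp [pvStepCond, pvA_condInner, hb, pv_cond_frozen]
      · simp only [pvStepCond, pvA_condInner, hb, Nat.succ_ne_zero, beq_iff_eq, if_true,
          Bool.or_false, if_false, Bool.false_eq_true,
          Nat.add_sub_cancel]
        rw [ih n (acc ++ [l])]
        simp

theorem pv_cond_run (lines : List String) (n : Nat) (acc : List String) :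
    (lines.foldl pvStepCond (false, false, n, acc)).2.2.2 = acc ++ pvA_cond lines := by
  induction lines generalizing n acc with
  | nil => simp [pvA_cond]
  | cons l rest ih =>
    rw [List.foldl_cons]
    by_cases h : PySem.Str.startswith l "Conditions:" = true
    · simp only [pvStepCond, pvA_cond, h, Bool.not_false, Bool.true_and, if_true,
        Bool.false_eq_true, ite_false]
      rw [pv_cond_active]
      simp
    · simp only [pvStepCond, pvA_cond, h, Bool.not_false, Bool.true_and,
        Bool.false_eq_true, ite_false]
      exact ih n acc

theorem pv_events_all (lines : List String) (acc : List String) :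
    (lines.foldl pvStepEvents (true, acc)).2 = acc ++ lines := by
  induction lines generalizing acc with
  | nil => simp
  | cons l rest ih => rw [List.foldl_cons]; simp [pvStepEvents, ih]

theorem pv_events_run (lines : List String) (acc : List String) :
    (lines.foldl pvStepEvents (false, acc)).2 = acc ++ pvA_events lines := by
  induction lines generalizing acc with
  | nil => simp [pvA_events]
  | cons l rest ih =>
    rw [List.foldl_cons]
    simp only [pvStepEvents, pvA_events]
    split_ifs <;> simp_all [pv_events_all]

theorem pv_main (lines : List String) :
    (lines.foldl pvB_step pvB_init).status = pvA_status lines false [] ∧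
    (lines.foldl pvB_step pvB_init).condL = pvA_cond lines ∧
    (lines.foldl pvB_step pvB_init).stateL = lines.foldl (fun acc l => if pvHit l then acc ++ [l] else acc) [] ∧
    (lines.foldl pvB_step pvB_init).events = pvA_events lines := by
  refine ⟨?_, ?_, ?_, ?_⟩
  · have h := pv_proj_status lines pvB_init
    have := congrArg (fun p => p.2.2) h
    simpa [pvB_init, pv_status_run] using this
  · have h := pv_proj_cond lines pvB_init
    have := congrArg (fun p => p.2.2.2) h
    simpa [pvB_init, pv_cond_run] using this
  · simpa [pvB_init] using pv_proj_state lines pvB_init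
  · have h := pv_proj_events lines pvB_init
    have := congrArg (fun p => p.2) h
    simpa [pvB_init, pv_events_run] using this

-- ===== VERDICT (by name: the statement is the Claim_ definition above) =====
theorem parse_describe_output_py_spec : Claim_equal_parse_describe_output_py := by
  intro output _
  unfold Spec_parse_describe_output_py parse_describe_output_py parse_describe_output_py_alt
  obtain ⟨h1, h2, h3, h4⟩ := pv_main ((PySem.Str.split? output "\n").getD [])
  simp only [h1, h2, h3, h4]
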